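-- pv_equiv track=rewrite | github.com/EdsonEddy/perfilTesis2 | NuevoControlDeCopias/solutions/2177/Brherrera3114_Problem2177_Accepted/Brherrera3114_Problem2177_Accepted.py | autom
-- ===== SOURCE A (Python) =====
-- def autom(aux1,cont):
--     c = cont
--     digito = 0
--     while cont > 0:
--         digito = digito + (aux1 % 10)
--         aux1 = aux1 // 10
--         cont = cont - 1
--     if digito > 9:
--             digito = autom(digito,c)
--     return digito
-- ===== SOURCE B (Python) =====
-- def autom(aux1, cont):
--     # closed form: the answer is the digital root of aux1 mod 10**cont.
--     # The modulus only needs to grow until it exceeds abs(aux1): any higher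
--     # power of 10 is congruent to it mod 9 and leaves the digital root unchanged.
--     if cont <= 0:
--         return 0
--     a = abs(aux1)
--     p = 1
--     e = 0
--     while e < cont and p <= a:
--         p *= 10
--         e += 1
--     m = aux1 % p
--     return 0 if m == 0 else 1 + (m - 1) % 9
-- ===== Notes on version B (the rewrite author's own statement) =====
-- stated objective: faster
-- what changed: Replaces A's cont-iteration digit loop plus recursive re-summing with a closed form: the result is the digital root (0, or 1 + (m-1) % 9) of m = aux1 mod 10**e, where the power of 10 is grown only until it exceeds |aux1| or reaches cont, so no per-digit summing passes remain.
import Mathlib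
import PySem

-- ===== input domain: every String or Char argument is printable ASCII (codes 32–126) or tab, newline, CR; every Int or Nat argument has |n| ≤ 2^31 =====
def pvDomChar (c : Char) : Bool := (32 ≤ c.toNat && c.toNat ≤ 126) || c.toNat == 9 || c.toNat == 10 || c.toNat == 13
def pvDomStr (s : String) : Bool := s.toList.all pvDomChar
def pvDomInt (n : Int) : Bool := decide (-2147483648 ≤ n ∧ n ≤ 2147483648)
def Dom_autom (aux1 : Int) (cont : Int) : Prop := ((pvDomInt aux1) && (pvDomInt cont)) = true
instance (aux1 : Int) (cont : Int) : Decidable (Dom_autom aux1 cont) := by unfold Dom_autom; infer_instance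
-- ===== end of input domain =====

-- B replaces A's digit-extraction loop + recursion by the closed form
-- "digital root of aux1 mod 10**p", with the power of 10 grown only until it
-- exceeds |aux1| (higher powers leave the digital root unchanged); objective: faster.

-- ===== PORT A =====
-- the inner `while cont > 0` loop: state (aux1, digito), counted down cont times
def automSum (aux1 : Int) (digito : Int) : Nat → Int
  | 0 => digito
  | Nat.succ k => automSum (PySem.Int.floordiv aux1 10) (digito + PySem.Int.mod aux1 10) k

-- the tail recursion `digito = autom(digito, c)` with a fuel guard for structural
-- totality only; within Dom the fuel 2^40 is never exhausted (see autom_spec)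
def automFuel : Nat → Int → Int → Int
  | 0, aux1, cont => automSum aux1 0 cont.toNat
  | fuel+1, aux1, cont =>
      let digito := automSum aux1 0 cont.toNat
      if digito > 9 then automFuel fuel digito cont else digito

def autom (aux1 : Int) (cont : Int) : Int := automFuel 1099511627776 aux1 cont

-- ===== PORT B =====
-- the `while e < cont and p <= a` loop: the remaining iteration budget cont-e is the Nat argument
def altPow (a : Int) (p : Int) : Nat → Int
  | 0 => p
  | r+1 => if p ≤ a then altPow a (p * 10) r else p

def autom_alt (aux1 : Int) (cont : Int) : Int :=
  if cont ≤ 0 then 0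
  else
    let p := altPow |aux1| 1 cont.toNat
    let m := PySem.Int.mod aux1 p
    if m = 0 then 0 else 1 + PySem.Int.mod (m - 1) 9

-- ===== PRECONDITION & SPEC =====
def Spec_autom (aux1 : Int) (cont : Int) (out : Int) : Prop := out = autom_alt aux1 cont
instance (aux1 : Int) (cont : Int) (out : Int) : Decidable (Spec_autom aux1 cont out) := by unfold Spec_autom; infer_instance

-- ===== CLAIM (what is proved, stated in full; the proofs are below) =====
def Claim_equal_autom : Prop := ∀ (aux1 : Int) (cont : Int), Dom_autom aux1 cont → Spec_autom aux1 cont (autom aux1 cont)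

-- ===== LEMMAS AND PROOFS =====

-- mathematical skeleton of A's inner loop: sum of the low c floor-digits
def dsum : Nat → Int → Int
  | 0, _ => 0
  | c+1, n => n % 10 + dsum c (n / 10)

theorem automSum_eq (c : Nat) : ∀ (a d : Int), automSum a d c = d + dsum c a := by
  induction c with
  | zero => intro a d; simp [automSum, dsum]
  | succ c ih =>
      intro a d
      simp only [automSum, dsum,
        PySem.Int.floordiv_eq_ediv_of_pos (by norm_num : (0:Int) < 10),
        PySem.Int.mod_eq_emod_of_pos (by norm_num : (0:Int) < 10), ih]
      ring

theorem automFuel_succ (f : Nat) (a cont : Int) :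
    automFuel (f+1) a cont =
      (if automSum a 0 cont.toNat > 9 then automFuel f (automSum a 0 cont.toNat) cont
       else automSum a 0 cont.toNat) := rfl

theorem dsum_nonneg (c : Nat) : ∀ n : Int, 0 ≤ dsum c n := by
  induction c with
  | zero => intro n; simp [dsum]
  | succ c ih =>
      intro n
      have h1 : 0 ≤ n % 10 := Int.emod_nonneg n (by norm_num)
      have h2 := ih (n / 10)
      simp only [dsum]; omega

theorem dsum_zero (c : Nat) : dsum c 0 = 0 := by
  induction c with
  | zero => simp [dsum]
  | succ c ih => simp [dsum, ih]

theorem dsum_le (c : Nat) : ∀ n : Int, 0 ≤ n → dsum c n ≤ n := by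
  induction c with
  | zero => intro n hn; simpa [dsum] using hn
  | succ c ih =>
      intro n hn
      have hq : 0 ≤ n / 10 := Int.ediv_nonneg hn (by norm_num)
      have h1 := ih (n / 10) hq
      have h2 := Int.mul_ediv_add_emod n 10
      simp only [dsum]; omega

theorem dsum_lt (c : Nat) (n : Int) (hc : 1 ≤ c) (hn : 10 ≤ n) : dsum c n < n := by
  cases c with
  | zero => omega
  | succ c =>
      have hq : 0 ≤ n / 10 := Int.ediv_nonneg (by omega) (by norm_num)
      have h1 := dsum_le c (n / 10) hq
      have h2 := Int.mul_ediv_add_emod n 10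
      have h3 : 0 ≤ n % 10 := Int.emod_nonneg n (by norm_num)
      have h4 : n % 10 < 10 := Int.emod_lt_of_pos n (by norm_num)
      simp only [dsum]; omega

theorem dsum_pos (c : Nat) : ∀ n : Int, 0 < n → n < (10:Int) ^ c → 0 < dsum c n := by
  induction c with
  | zero => intro n h1 h2; simp at h2; omega
  | succ c ih =>
      intro n h1 h2
      have hr0 : 0 ≤ n % 10 := Int.emod_nonneg n (by norm_num)
      have hdq : 0 ≤ dsum c (n / 10) := dsum_nonneg c (n / 10)
      have hdm := Int.mul_ediv_add_emod n 10
      by_cases hr : 0 < n % 10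
      · simp only [dsum]; omega
      · have hq1 : 0 < n / 10 := by omega
        have hq2 : n / 10 < (10:Int) ^ c := by
          have : (10:Int) ^ (c+1) = 10 * 10 ^ c := by ring
          omega
        have := ih (n / 10) hq1 hq2
        simp only [dsum]; omega

theorem dsum_le_9c (c : Nat) : ∀ n : Int, dsum c n ≤ 9 * (c : Int) := by
  induction c with
  | zero => intro n; simp [dsum]
  | succ c ih =>
      intro n
      have h1 := ih (n / 10)
      have h4 : n % 10 < 10 := Int.emod_lt_of_pos n (by norm_num)
      simp only [dsum]; push_cast; omega

theorem pow9 (c : Nat) (hc : 1 ≤ c) : 9 * (c : Int) < (10:Int) ^ c := by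
  induction c with
  | zero => omega
  | succ c ih =>
      by_cases h : 1 ≤ c
      · have h1 := ih h
        have h2 : (1:Int) ≤ 10 ^ c := one_le_pow₀ (by norm_num)
        have h3 : (10:Int) ^ (c+1) = 10 * 10 ^ c := by ring
        push_cast; push_cast at h1; omega
      · have hc0 : c = 0 := by omega
        subst hc0; norm_num

theorem dsum_mod9 (c : Nat) : ∀ n : Int, (9:Int) ∣ (n - n / (10:Int) ^ c) - dsum c n := by
  induction c with
  | zero => intro n; simp [dsum]
  | succ c ih =>
      intro n
      have ihq := ih (n / 10)
      have hdd : n / 10 / (10:Int) ^ c = n / (10:Int) ^ (c+1) := by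
        rw [Int.ediv_ediv_of_nonneg (by norm_num : (0:Int) ≤ 10)]
        norm_num [pow_succ, mul_comm]
      rw [hdd] at ihq
      have hdm := Int.mul_ediv_add_emod n 10
      simp only [dsum]; omega

-- mod/div juggling: (n % (10*p)) / 10 = (n / 10) % p for p > 0
theorem emod_mul_ediv (n p : Int) (_hp : 0 < p) : n % (10 * p) / 10 = n / 10 % p := by
  have h1 : n % (10 * p) = n + (-(p * (n / (10 * p)))) * 10 := by
    rw [Int.emod_def]; ring
  rw [h1, Int.add_mul_ediv_right _ _ (by norm_num : (10:Int) ≠ 0)]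
  have h3 : n / 10 / p = n / (10 * p) := Int.ediv_ediv_of_nonneg (by norm_num)
  rw [Int.emod_def (n / 10) p, h3]
  ring

theorem dsum_emod_pow (c : Nat) : ∀ n : Int, dsum c n = dsum c (n % (10:Int) ^ c) := by
  induction c with
  | zero => intro n; simp [dsum]
  | succ c ih =>
      intro n
      have hp : (0:Int) < 10 ^ c := by positivity
      have hps : (10:Int) ^ (c+1) = 10 * 10 ^ c := by ring
      have hmod : n % (10:Int) ^ (c+1) % 10 = n % 10 := by
        rw [hps]; exact Int.emod_emod_of_dvd n ⟨10 ^ c, by ring⟩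
      have hdiv : n % (10:Int) ^ (c+1) / 10 = n / 10 % 10 ^ c := by
        rw [hps]; exact emod_mul_ediv n _ hp
      calc dsum (c+1) n = n % 10 + dsum c (n / 10) := rfl
        _ = n % 10 + dsum c (n / 10 % 10 ^ c) := by rw [← ih]
        _ = dsum (c+1) (n % (10:Int) ^ (c+1)) := by
              simp only [dsum, hmod, hdiv]

theorem nine_dvd_pow_sub_one (c : Nat) : (9:Int) ∣ (10:Int) ^ c - 1 := by
  induction c with
  | zero => simp
  | succ c ih =>
      have h : (10:Int) ^ (c+1) - 1 = 10 * ((10:Int) ^ c - 1) + 9 := by ring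
      omega

theorem altPow_spec (r : Nat) : ∀ (a : Int) (s : Nat),
    ∃ e : Nat, altPow a ((10:Int) ^ s) r = (10:Int) ^ (s + e) ∧ e ≤ r ∧
      (e = r ∨ a < (10:Int) ^ (s + e)) := by
  induction r with
  | zero => intro a s; exact ⟨0, rfl, le_refl 0, Or.inl rfl⟩
  | succ r ih =>
      intro a s
      by_cases h : (10:Int) ^ s ≤ a
      · obtain ⟨e, h1, h2, h3⟩ := ih a (s + 1)
        refine ⟨e + 1, ?_, by omega, ?_⟩
        · show (if (10:Int) ^ s ≤ a then altPow a ((10:Int) ^ s * 10) r else (10:Int) ^ s) = _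
          rw [if_pos h, ← pow_succ, h1]
          ring_nf
        · rcases h3 with h3 | h3
          · exact Or.inl (by omega)
          · exact Or.inr (by rw [show s + (e + 1) = s + 1 + e by omega]; exact h3)
      · refine ⟨0, ?_, by omega, Or.inr ?_⟩
        · show (if (10:Int) ^ s ≤ a then altPow a ((10:Int) ^ s * 10) r else (10:Int) ^ s) = _
          rw [if_neg h, Nat.add_zero]
        · rw [Nat.add_zero]; omega

-- the digital root of x % 10^e equals that of x % 10^c once 10^e exceeds |x|
theorem droot_pow_eq (x : Int) (e c : Nat) (hec : e ≤ c)
    (h : e = c ∨ |x| < (10:Int) ^ e) :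
    (if x % (10:Int) ^ e = 0 then (0:Int) else 1 + (x % (10:Int) ^ e - 1) % 9) =
    (if x % (10:Int) ^ c = 0 then (0:Int) else 1 + (x % (10:Int) ^ c - 1) % 9) := by
  rcases h with h | h
  · subst h; rfl
  · obtain ⟨hx1, hx2⟩ := abs_lt.mp h
    have hle : (10:Int) ^ e ≤ (10:Int) ^ c := pow_le_pow_right₀ (by norm_num) hec
    by_cases hx : 0 ≤ x
    · rw [Int.emod_eq_of_lt hx (by omega), Int.emod_eq_of_lt hx (by omega)]
    · have he1 : x % (10:Int) ^ e = x + 10 ^ e := by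
        have hh := Int.add_mul_emod_self_left (a := x) (b := (10:Int) ^ e) (c := 1)
        rw [mul_one] at hh
        rw [← hh, Int.emod_eq_of_lt (by omega) (by omega)]
      have hc1 : x % (10:Int) ^ c = x + 10 ^ c := by
        have hh := Int.add_mul_emod_self_left (a := x) (b := (10:Int) ^ c) (c := 1)
        rw [mul_one] at hh
        rw [← hh, Int.emod_eq_of_lt (by omega) (by omega)]
      have d1 := nine_dvd_pow_sub_one e
      have d2 := nine_dvd_pow_sub_one c
      rw [he1, hc1, if_neg (by omega), if_neg (by omega)]
      omega

-- B's value in terms of the full modulus 10^cont.toNat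
theorem autom_alt_eq (aux1 cont : Int) (hc : 0 < cont) :
    autom_alt aux1 cont =
      (if aux1 % (10:Int) ^ cont.toNat = 0 then (0:Int)
       else 1 + (aux1 % (10:Int) ^ cont.toNat - 1) % 9) := by
  obtain ⟨e, h1, h2, h3⟩ := altPow_spec cont.toNat |aux1| 0
  rw [pow_zero, Nat.zero_add] at h1
  rw [Nat.zero_add] at h3
  have hpe : (0:Int) < 10 ^ e := by positivity
  have hmm : PySem.Int.mod aux1 ((10:Int) ^ e) = aux1 % (10:Int) ^ e :=
    PySem.Int.mod_eq_emod_of_pos hpe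
  have h9 : PySem.Int.mod (aux1 % (10:Int) ^ e - 1) 9 = (aux1 % (10:Int) ^ e - 1) % 9 :=
    PySem.Int.mod_eq_emod_of_pos (by norm_num)
  unfold autom_alt
  rw [if_neg (by omega)]
  simp only [h1, hmm, h9]
  exact droot_pow_eq aux1 e cont.toNat h2 h3

-- core: on a nonnegative value below 10^cont.toNat, the fueled recursion computes the digital root
theorem automFuel_core (cont : Int) (hc : 0 < cont) :
    ∀ (k F : Nat) (n : Int), 0 ≤ n → n < (10:Int) ^ cont.toNat → n.toNat ≤ k → k ≤ F →
      automFuel F n cont = (if n = 0 then 0 else 1 + (n - 1) % 9) := by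
  intro k
  induction k with
  | zero =>
      intro F n h0 _ hk _
      have hn : n = 0 := by omega
      subst hn
      cases F with
      | zero => simp [automFuel, automSum_eq, dsum_zero]
      | succ f => rw [automFuel_succ, automSum_eq, dsum_zero]; norm_num
  | succ k ih =>
      intro F n h0 hlt hk hkF
      cases F with
      | zero =>
          have hn : n = 0 := by omega
          subst hn
          simp [automFuel, automSum_eq, dsum_zero]
      | succ f =>
          rw [automFuel_succ, automSum_eq]
          have hd0 : 0 ≤ dsum cont.toNat n := dsum_nonneg _ n
          have hdle : dsum cont.toNat n ≤ n := dsum_le _ n h0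
          have hdiv0 : n / (10:Int) ^ cont.toNat = 0 := Int.ediv_eq_zero_of_lt h0 hlt
          have hd9 : (9:Int) ∣ (n - n / (10:Int) ^ cont.toNat) - dsum cont.toNat n :=
            dsum_mod9 _ n
          rw [hdiv0] at hd9
          by_cases hn0 : n = 0
          · subst hn0
            simp [dsum_zero]
          · have hnpos : 0 < n := by omega
            have hdpos : 0 < dsum cont.toNat n := dsum_pos _ n hnpos hlt
            by_cases hbig : dsum cont.toNat n > 9
            · rw [zero_add, if_pos hbig]
              have hn10 : 10 ≤ n := by omega
              have hdlt : dsum cont.toNat n < n := dsum_lt _ n (by omega) hn10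
              have := ih f (dsum cont.toNat n) (by omega) (by omega) (by omega) (by omega)
              rw [this]
              have hne : dsum cont.toNat n ≠ 0 := by omega
              rw [if_neg hne, if_neg hn0]
              omega
            · rw [zero_add, if_neg hbig, if_neg hn0]
              omega

-- ===== VERDICT (by name: the statement is the Claim_ definition above) =====
theorem autom_spec : Claim_equal_autom := by
  unfold Claim_equal_autom Spec_autom autom
  intro aux1 cont hdom
  have hfuel : (1099511627776 : Nat) = 1099511627775 + 1 := by norm_num
  rw [hfuel, automFuel_succ, automSum_eq]
  by_cases hc : cont ≤ 0
  · have hc0 : cont.toNat = 0 := by omega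
    unfold autom_alt
    simp [hc, hc0, dsum]
  · have hcpos : 0 < cont := by omega
    have hc1 : 1 ≤ cont.toNat := by omega
    have hcbound : cont ≤ 2147483648 := by
      simp only [Dom_autom, pvDomInt, Bool.and_eq_true, decide_eq_true_eq] at hdom
      omega
    have hcnat : (cont.toNat : Int) ≤ 2147483648 := by omega
    have hppos : (0:Int) < 10 ^ cont.toNat := by positivity
    rw [autom_alt_eq aux1 cont hcpos]
    set m := aux1 % (10:Int) ^ cont.toNat with hm
    have hm0 : 0 ≤ m := Int.emod_nonneg aux1 (by omega)
    have hmlt : m < (10:Int) ^ cont.toNat := Int.emod_lt_of_pos aux1 hppos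
    have hds : dsum cont.toNat aux1 = dsum cont.toNat m := dsum_emod_pow _ aux1
    have hdm9 : (9:Int) ∣ (m - m / (10:Int) ^ cont.toNat) - dsum cont.toNat m :=
      dsum_mod9 _ m
    rw [Int.ediv_eq_zero_of_lt hm0 hmlt] at hdm9
    have hd0 : 0 ≤ dsum cont.toNat m := dsum_nonneg _ m
    rw [hds]
    by_cases hmz : m = 0
    · rw [if_pos hmz, hmz, dsum_zero]
      norm_num
    · have hmpos : 0 < m := by omega
      have hdpos : 0 < dsum cont.toNat m := dsum_pos _ m hmpos hmlt
      rw [if_neg hmz]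
      by_cases hbig : dsum cont.toNat m > 9
      · rw [zero_add, if_pos hbig]
        have hd9c : dsum cont.toNat m ≤ 9 * (cont.toNat : Int) := dsum_le_9c _ m
        have hdlt : dsum cont.toNat m < (10:Int) ^ cont.toNat := by
          have := pow9 cont.toNat hc1
          omega
        have hcore := automFuel_core cont hcpos (dsum cont.toNat m).toNat 1099511627775
          (dsum cont.toNat m) (by omega) hdlt (le_refl _) (by omega)
        rw [hcore]
        have hne : dsum cont.toNat m ≠ 0 := by omega
        rw [if_neg hne]
        omega
      · rw [zero_add, if_neg hbig]
        omega
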